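-- pv_equiv track=rewrite | github.com/shivg7706/CodeJam | gcj1.py | curdam
-- ===== SOURCE A (Python) =====
-- def curdam(s):
-- 	charge = 1
-- 	damage = 0
-- 	for i in s:
-- 		if i == 'C':
-- 			charge *= 2
-- 		else:
-- 			damage += charge
-- 	return damage
-- ===== SOURCE B (Python) =====
-- def curdam(s):
--     return sum(len(seg) * 2 ** i for i, seg in enumerate(s.split('C')))
-- ===== Notes on version B (the rewrite author's own statement) =====
-- stated objective: simpler
-- what changed: Replaces the charge/damage accumulator loop by splitting the string on 'C' and summing len(segment) * 2**index over the enumerated segments; the per-character Python loop disappears into C-level str.split and len.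
import Mathlib
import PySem

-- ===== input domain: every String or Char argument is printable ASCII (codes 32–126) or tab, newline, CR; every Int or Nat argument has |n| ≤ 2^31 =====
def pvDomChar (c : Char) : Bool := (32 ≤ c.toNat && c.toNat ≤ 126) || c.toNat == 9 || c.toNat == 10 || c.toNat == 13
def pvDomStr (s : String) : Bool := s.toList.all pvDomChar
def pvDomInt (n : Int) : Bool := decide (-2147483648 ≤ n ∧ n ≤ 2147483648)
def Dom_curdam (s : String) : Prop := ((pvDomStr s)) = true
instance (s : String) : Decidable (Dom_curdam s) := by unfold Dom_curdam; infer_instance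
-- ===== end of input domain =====

-- B replaces A's charge/damage accumulator loop by split-on-'C' then a sum of
-- segment lengths weighted by powers of two (objective: simpler).

-- ===== PORT A =====
def curdam (s : String) : Int :=
  (s.toList.foldl
    (fun st c => if c = 'C' then (st.1 * 2, st.2) else (st.1, st.2 + st.1))
    ((1 : Int), (0 : Int))).2

-- ===== PORT B =====
-- Source B: sum(len(seg) * 2 ** i for i, seg in enumerate(s.split('C')))
-- s.split('C') (single-char separator, keeps empty pieces) is ported as List.splitOn 'C'.
def curdam_alt (s : String) : Int :=
  (((s.toList.splitOn 'C').zipIdx).map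
    (fun p => (p.1.length : Int) * 2 ^ p.2)).sum

-- ===== PRECONDITION & SPEC =====
def Spec_curdam (s : String) (out : Int) : Prop := out = curdam_alt s
instance (s : String) (out : Int) : Decidable (Spec_curdam s out) := by unfold Spec_curdam; infer_instance

-- ===== CLAIM (what is proved, stated in full; the proofs are below) =====
def Claim_equal_curdam : Prop := ∀ (s : String), Dom_curdam s → Spec_curdam s (curdam s)

-- ===== LEMMAS AND PROOFS =====

-- the weighted-segment sum starting at index k
def pvSegSum (k : Nat) (l : List (List Char)) : Int :=
  ((l.zipIdx k).map (fun p => (p.1.length : Int) * 2 ^ p.2)).sum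

theorem pvSegSum_nil (k : Nat) : pvSegSum k [] = 0 := by simp [pvSegSum]

theorem pvSegSum_cons (k : Nat) (x : List Char) (l : List (List Char)) :
    pvSegSum k (x :: l) = (x.length : Int) * 2 ^ k + pvSegSum (k + 1) l := by
  simp [pvSegSum, List.zipIdx_cons]

theorem pvSegSum_succ (k : Nat) (l : List (List Char)) :
    pvSegSum (k + 1) l = 2 * pvSegSum k l := by
  induction l generalizing k with
  | nil => simp [pvSegSum_nil]
  | cons x t ih =>
      rw [pvSegSum_cons, pvSegSum_cons, ih, pow_succ]
      ring

theorem pvSplitOnP_ne_nil (p : Char → Bool) (l : List Char) :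
    List.splitOnP p l ≠ [] := by
  induction l with
  | nil => simp [List.splitOnP_nil]
  | cons x t ih =>
      rw [List.splitOnP_cons]
      split
      · simp
      · cases h : List.splitOnP p t with
        | nil => exact absurd h ih
        | cons a b => simp [h, List.modifyHead]

theorem pv_key (l : List Char) (ch dm : Int) :
    (l.foldl
      (fun st c => if c = 'C' then (st.1 * 2, st.2) else (st.1, st.2 + st.1))
      (ch, dm)).2 = dm + ch * pvSegSum 0 (List.splitOnP (fun a => a == 'C') l) := by
  induction l generalizing ch dm with
  | nil =>
      simp [List.splitOnP_nil, pvSegSum_cons, pvSegSum_nil]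
  | cons c t ih =>
      rw [List.foldl_cons, List.splitOnP_cons]
      by_cases hc : c = 'C'
      · have hb : (c == 'C') = true := by simp [hc]
        rw [if_pos hc, hb, if_pos rfl, ih, pvSegSum_cons, pvSegSum_succ]
        simp [mul_assoc]
      · have hb : (c == 'C') = false := by simp [hc]
        rw [if_neg hc, hb, if_neg (by simp), ih]
        cases h : List.splitOnP (fun a => a == 'C') t with
        | nil => exact absurd h (pvSplitOnP_ne_nil _ t)
        | cons a b =>
            simp only [List.modifyHead_cons, pvSegSum_cons, List.length_cons]
            push_cast
            ring

-- ===== VERDICT (by name: the statement is the Claim_ definition above) =====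
theorem curdam_spec : Claim_equal_curdam := by
  intro s _
  unfold Spec_curdam curdam curdam_alt
  rw [pv_key]
  simp [pvSegSum, List.splitOn]
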